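-- pv_equiv track=rewrite | github.com/user221000/MetodoBaseWeb | core/selector_alimentos.py | _filtrar_penalizados
-- ===== SOURCE A (Python) =====
-- def _filtrar_penalizados(lista: list[str], penalizados: list[str]) -> list[str]:
--     """Mueve penalizados al final. Si la lista queda vacía, usa backup completo."""
--     if not penalizados:
--         return lista
--     penalizados_set = set(penalizados)
--     no_penalizados = [a for a in lista if a not in penalizados_set]
--     if not no_penalizados:
--         return lista  # backup: devolver todo si filtrar deja vacío
--     cola = [a for a in lista if a in penalizados_set]
--     return no_penalizados + cola
-- ===== SOURCE B (Python) =====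
-- def _filtrar_penalizados(lista: list[str], penalizados: list[str]) -> list[str]:
--     """Mueve penalizados al final: un sort estable por pertenencia.
--
--     La ordenacion estable deja los no penalizados (clave False) primero en su
--     orden original y los penalizados (clave True) despues; cuando todos (o
--     ninguno) estan penalizados el resultado es la lista original, lo que cubre
--     los dos 'return lista' de A sin ramas."""
--     penalizados_set = set(penalizados)
--     return sorted(lista, key=lambda a: a in penalizados_set)
-- ===== Notes on version B (the rewrite author's own statement) =====
-- stated objective: simpler
-- what changed: Replaces the two filtering passes plus the empty-list backup branches with a single stable sort keyed on set membership; sort stability makes both early-return branches unnecessary.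
import Mathlib
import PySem

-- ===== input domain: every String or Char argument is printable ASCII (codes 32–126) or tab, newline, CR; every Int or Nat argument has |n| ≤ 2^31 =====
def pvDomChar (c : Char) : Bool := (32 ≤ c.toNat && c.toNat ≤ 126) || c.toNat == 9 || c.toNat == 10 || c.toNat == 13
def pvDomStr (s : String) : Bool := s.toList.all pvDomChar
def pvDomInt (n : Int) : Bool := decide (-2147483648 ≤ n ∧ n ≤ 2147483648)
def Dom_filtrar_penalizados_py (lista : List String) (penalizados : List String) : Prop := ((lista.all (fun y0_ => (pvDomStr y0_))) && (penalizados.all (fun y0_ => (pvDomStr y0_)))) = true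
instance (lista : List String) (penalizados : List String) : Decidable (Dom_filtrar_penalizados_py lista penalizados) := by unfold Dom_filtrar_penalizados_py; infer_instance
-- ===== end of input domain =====

-- B replaces A's two filter passes and backup branches by one stable sort on
-- set membership (objective: simpler); return-value equivalence is proved.

-- ===== PORT A =====
def filtrar_penalizados_py (lista : List String) (penalizados : List String) : List String :=
  if penalizados = [] then lista
  else
    let penalizados_set : PySem.Set String := PySem.Set.ofList penalizados
    let no_penalizados := lista.filter (fun a => !(penalizados_set.contains a))
    if no_penalizados = [] then lista
    else
      let cola := lista.filter (fun a => penalizados_set.contains a)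
      no_penalizados ++ cola

-- ===== PORT B =====
def filtrar_penalizados_py_alt (lista : List String) (penalizados : List String) : List String :=
  let penalizados_set : PySem.Set String := PySem.Set.ofList penalizados
  PySem.List.sorted lista (fun a => if penalizados_set.contains a then (1 : Nat) else 0) false

-- ===== PRECONDITION & SPEC =====
def Spec_filtrar_penalizados_py (lista : List String) (penalizados : List String) (out : List String) : Prop := out = filtrar_penalizados_py_alt lista penalizados
instance (lista : List String) (penalizados : List String) (out : List String) : Decidable (Spec_filtrar_penalizados_py lista penalizados out) := by unfold Spec_filtrar_penalizados_py; infer_instance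

-- ===== CLAIM (what is proved, stated in full; the proofs are below) =====
def Claim_equal_filtrar_penalizados_py : Prop := ∀ (lista : List String) (penalizados : List String), Dom_filtrar_penalizados_py lista penalizados → Spec_filtrar_penalizados_py lista penalizados (filtrar_penalizados_py lista penalizados)

-- ===== LEMMAS AND PROOFS =====

-- Inserting a key-0 element into "key-0 block ++ key-1 block" puts it between the blocks.
theorem insertBy_key_zero {α : Type} (k : α → Nat) (x : α) (hx : k x = 0)
    (u v : List α) (hu : ∀ y ∈ u, k y = 0) (hv : ∀ y ∈ v, k y = 1) :
    PySem.List.insertBy (fun a b => decide (k a < k b)) x (u ++ v) = u ++ x :: v := by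
  induction u with
  | nil =>
    cases v with
    | nil => rfl
    | cons y ys =>
      have h1 : k y = 1 := hv y (by simp)
      simp [PySem.List.insertBy, hx, h1]
  | cons a u' ih =>
    have ha : k a = 0 := hu a (by simp)
    simp only [List.cons_append, PySem.List.insertBy, hx, ha]
    simp [ih (fun y hy => hu y (by simp [hy])) ]

-- A stable sort by a 0/1-valued key is the partition: key-0 elements first, key-1 after.
theorem sorted_binary_key {α : Type} (k : α → Nat) (hk : ∀ a, k a = 0 ∨ k a = 1)
    (xs : List α) :
    PySem.List.sorted xs k false
      = xs.filter (fun a => k a == 0) ++ xs.filter (fun a => k a == 1) := by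
  rw [PySem.List.sorted_eq_foldl_insertBy]
  suffices h : ∀ (rest p : List α),
      List.foldl (fun acc x => PySem.List.insertBy (fun a b => decide (k a < k b)) x acc)
        (p.filter (fun a => k a == 0) ++ p.filter (fun a => k a == 1)) rest
      = (p ++ rest).filter (fun a => k a == 0) ++ (p ++ rest).filter (fun a => k a == 1) by
    simpa using h xs []
  intro rest
  induction rest with
  | nil => intro p; simp
  | cons x rest ih =>
    intro p
    have hu : ∀ y ∈ p.filter (fun a => k a == 0), k y = 0 := by
      intro y hy; simpa using (List.of_mem_filter hy)
    have hv : ∀ y ∈ p.filter (fun a => k a == 1), k y = 1 := by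
      intro y hy; simpa using (List.of_mem_filter hy)
    rcases hk x with hx | hx
    · have hins := insertBy_key_zero k x hx _ _ hu hv
      simp only [List.foldl_cons, hins]
      have : p.filter (fun a => k a == 0) ++ x :: p.filter (fun a => k a == 1)
          = (p ++ [x]).filter (fun a => k a == 0) ++ (p ++ [x]).filter (fun a => k a == 1) := by
        simp [List.filter_append, hx]
      rw [this, ih (p ++ [x])]
      simp
    · have hnb : ∀ y ∈ p.filter (fun a => k a == 0) ++ p.filter (fun a => k a == 1),
          (fun a b => decide (k a < k b)) x y = false := by
        intro y hy
        rcases List.mem_append.mp hy with h | h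
        · simp [hx, hu y h]
        · simp [hx, hv y h]
      have hins := PySem.List.insertBy_of_forall_not_before (fun a b => decide (k a < k b)) x _ hnb
      simp only [List.foldl_cons, hins]
      have : (p.filter (fun a => k a == 0) ++ p.filter (fun a => k a == 1)) ++ [x]
          = (p ++ [x]).filter (fun a => k a == 0) ++ (p ++ [x]).filter (fun a => k a == 1) := by
        simp [List.filter_append, hx]
      rw [this, ih (p ++ [x])]
      simp

theorem alt_eq_partition (lista penalizados : List String) :
    filtrar_penalizados_py_alt lista penalizados
      = lista.filter (fun a => !((PySem.Set.ofList penalizados).contains a))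
        ++ lista.filter (fun a => (PySem.Set.ofList penalizados).contains a) := by
  unfold filtrar_penalizados_py_alt
  rw [sorted_binary_key _ (fun a => by
    by_cases h : (PySem.Set.ofList penalizados).contains a = true
    · right; rw [if_pos h]
    · left; rw [if_neg h])]
  congr 1 <;> refine List.filter_congr (fun a _ => ?_) <;>
    cases hc : (PySem.Set.ofList penalizados).contains a <;> rfl

-- ===== VERDICT (by name: the statement is the Claim_ definition above) =====
theorem filtrar_penalizados_py_spec : Claim_equal_filtrar_penalizados_py := by
  intro lista penalizados _
  unfold Spec_filtrar_penalizados_py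
  rw [alt_eq_partition]
  simp only [filtrar_penalizados_py]
  split_ifs with hp hnp
  · subst hp
    simp [PySem.Set.ofList]
  · rw [hnp, List.nil_append]
    refine (List.filter_eq_self.mpr ?_).symm
    intro a ha
    have h := List.filter_eq_nil_iff.mp hnp a ha
    simpa using h
  · rfl
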